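-- pv_equiv track=rewrite | github.com/BradHawthorne/ult3edit | src/ult3edit/exod.py | _crawl_text_width
-- ===== SOURCE A (Python) =====
-- CRAWL_FONT_WIDTH = 5     # pixels per character cell
--
-- CRAWL_FONT_SPACING = 1   # pixels between characters
--
-- CRAWL_WORD_SPACING = 3   # extra pixels for space character
--
-- def _crawl_text_width(text: str, spacing: int = CRAWL_FONT_SPACING) -> int:
--     """Calculate the total pixel width of composed text."""
--     if not text:
--         return 0
--     width = 0
--     for i, ch in enumerate(text):
--         if ch == ' ':
--             width += CRAWL_FONT_WIDTH + CRAWL_WORD_SPACING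
--         else:
--             width += CRAWL_FONT_WIDTH
--         if i < len(text) - 1:
--             width += spacing
--     return width
-- ===== SOURCE B (Python) =====
-- CRAWL_FONT_WIDTH = 5     # pixels per character cell
--
-- CRAWL_FONT_SPACING = 1   # pixels between characters
--
-- CRAWL_WORD_SPACING = 3   # extra pixels for space character
--
-- def _crawl_text_width(text: str, spacing: int = CRAWL_FONT_SPACING) -> int:
--     """Calculate the total pixel width of composed text."""
--     if not text:
--         return 0
--     return (len(text) * CRAWL_FONT_WIDTH
--             + text.count(' ') * CRAWL_WORD_SPACING
--             + (len(text) - 1) * spacing)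
-- ===== Notes on version B (the rewrite author's own statement) =====
-- stated objective: simpler
-- what changed: Replaces the per-character Python loop with branches and an inter-character spacing test by one closed-form arithmetic expression using len(text) and text.count(' ').
import Mathlib
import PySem

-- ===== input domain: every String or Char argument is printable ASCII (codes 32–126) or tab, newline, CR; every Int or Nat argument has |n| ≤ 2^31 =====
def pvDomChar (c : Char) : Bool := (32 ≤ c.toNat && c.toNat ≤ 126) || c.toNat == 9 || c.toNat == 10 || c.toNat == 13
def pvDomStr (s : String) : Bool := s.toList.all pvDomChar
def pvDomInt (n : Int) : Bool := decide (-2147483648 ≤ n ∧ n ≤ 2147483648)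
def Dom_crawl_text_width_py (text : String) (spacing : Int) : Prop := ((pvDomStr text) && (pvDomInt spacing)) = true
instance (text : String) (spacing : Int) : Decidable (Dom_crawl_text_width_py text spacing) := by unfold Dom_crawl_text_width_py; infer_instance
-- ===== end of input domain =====

-- B replaces A's per-character accumulation loop by a single closed-form expression
-- (len*FONT_WIDTH + count(' ')*WORD_SPACING + (len-1)*spacing); objective: simpler.


-- module constants
def CRAWL_FONT_WIDTH : Int := 5
def CRAWL_WORD_SPACING : Int := 3

-- ===== PORT A =====
-- literal port of A: for i, ch in enumerate(text): branch on ch == ' ', then add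
-- the inter-character spacing while i < len(text) - 1
def crawl_text_width_py (text : String) (spacing : Int) : Int :=
  let cs := text.toList
  if cs = [] then 0
  else
    (PySem.List.enumerate cs).foldl
      (fun width p =>
        let w1 := if p.2 = ' ' then width + (CRAWL_FONT_WIDTH + CRAWL_WORD_SPACING)
                  else width + CRAWL_FONT_WIDTH
        if p.1 < (cs.length : Int) - 1 then w1 + spacing else w1) 0

-- ===== PORT B =====
-- text.count(' ') for the single character ' ' is exactly List.count ' ' on the chars
def crawl_text_width_py_alt (text : String) (spacing : Int) : Int :=
  let cs := text.toList
  if cs = [] then 0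
  else
    (cs.length : Int) * CRAWL_FONT_WIDTH + (cs.count ' ' : Int) * CRAWL_WORD_SPACING
      + ((cs.length : Int) - 1) * spacing

-- ===== PRECONDITION & SPEC =====
def Spec_crawl_text_width_py (text : String) (spacing : Int) (out : Int) : Prop := out = crawl_text_width_py_alt text spacing
instance (text : String) (spacing : Int) (out : Int) : Decidable (Spec_crawl_text_width_py text spacing out) := by unfold Spec_crawl_text_width_py; infer_instance

-- ===== CLAIM (what is proved, stated in full; the proofs are below) =====
def Claim_equal_crawl_text_width_py : Prop := ∀ (text : String) (spacing : Int), Dom_crawl_text_width_py text spacing → Spec_crawl_text_width_py text spacing (crawl_text_width_py text spacing)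

-- ===== LEMMAS AND PROOFS =====

-- loop invariant for A's fold: enumerating l from start s, with n the total length,
-- the fold adds 5 per char, 3 per space, and spacing for every index below n - 1.
lemma crawl_fold (spacing n : Int) (l : List Char) : ∀ (s acc : Int), s + l.length = n →
    (PySem.List.enumerate l s).foldl
      (fun width p =>
        let w1 := if p.2 = ' ' then width + (CRAWL_FONT_WIDTH + CRAWL_WORD_SPACING)
                  else width + CRAWL_FONT_WIDTH
        if p.1 < n - 1 then w1 + spacing else w1) acc
    = acc + (l.length : Int) * CRAWL_FONT_WIDTH + (l.count ' ' : Int) * CRAWL_WORD_SPACING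
        + (if l = [] then 0 else ((l.length : Int) - 1) * spacing) := by
  induction l with
  | nil => intro s acc h; simp [PySem.List.enumerate_nil]
  | cons a t ih =>
    intro s acc h
    rw [PySem.List.enumerate_cons, List.foldl_cons]
    have hlen : s + (1 + (t.length : Int)) = n := by
      simp only [List.length_cons] at h; push_cast at h ⊢; omega
    by_cases ht : t = []
    · subst ht
      have hs : ¬ (s < n - 1) := by simp at hlen ⊢; omega
      by_cases ha : a = ' ' <;>
          simp [ha, hs, PySem.List.enumerate_nil, CRAWL_FONT_WIDTH, CRAWL_WORD_SPACING] <;> ring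
    · have hs : s < n - 1 := by
        have : (0:Int) < t.length := by
          exact_mod_cast Nat.pos_of_ne_zero (fun h0 => ht (List.eq_nil_of_length_eq_zero h0))
        omega
      by_cases ha : a = ' '
      · simp only [ha, if_pos hs, List.count_cons_self, List.length_cons]
        rw [ih (s + 1) _ (by omega)]
        simp [ht]
        ring
      · simp only [if_neg ha, if_pos hs, List.length_cons,
          List.count_cons_of_ne (by exact ha)]
        rw [ih (s + 1) _ (by omega)]
        simp [ht]
        ring

-- ===== VERDICT (by name: the statement is the Claim_ definition above) =====
theorem crawl_text_width_py_spec : Claim_equal_crawl_text_width_py := by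
  intro text spacing _
  unfold Spec_crawl_text_width_py crawl_text_width_py crawl_text_width_py_alt
  by_cases h : text.toList = []
  · simp [h]
  · simp only [h]
    rw [crawl_fold spacing (text.toList.length : Int) text.toList 0 0 (by simp)]
    simp [h]
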